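-- pv_equiv track=rewrite | github.com/Seb943/Smith_Waterman_Py | ABI-ExamLab-SébastienCARARO.py | alignment_string
-- ===== SOURCE A (Python) =====
-- def alignment_string(aligned_seqA, aligned_seqB):
--     '''This function creates the alignement string, useful for visualization
--     purposes, plus it shows a few figures '''
--
--     idents, gaps, mismatches = 0, 0, 0
--     alignment_string = []
--     for base1, base2 in zip(aligned_seqA, aligned_seqB): #loop that runs over both sequences simultaneously
--         if base1 == base2:
--             alignment_string.append('|')
--             idents += 1
--         elif '-' in (base1, base2):
--             alignment_string.append(' ')
--             gaps += 1
--         else: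
--             alignment_string.append(':')
--             mismatches += 1
--
--     return ''.join(alignment_string), idents, gaps, mismatches
-- ===== SOURCE B (Python) =====
-- def alignment_string(aligned_seqA, aligned_seqB):
--     '''Divide-and-conquer version: recursively split the pair range in half,
--     classify single pairs at the leaves, and merge (string, counts) upward.'''
--     pairs = list(zip(aligned_seqA, aligned_seqB))
--
--     def solve(lo, hi):
--         if hi <= lo:
--             return ('', 0, 0, 0)
--         if hi - lo == 1:
--             x, y = pairs[lo]
--             if x == y:
--                 return ('|', 1, 0, 0)
--             if x == '-' or y == '-':
--                 return (' ', 0, 1, 0)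
--             return (':', 0, 0, 1)
--         mid = (lo + hi) // 2
--         s1, i1, g1, m1 = solve(lo, mid)
--         s2, i2, g2, m2 = solve(mid, hi)
--         return (s1 + s2, i1 + i2, g1 + g2, m1 + m2)
--
--     return solve(0, len(pairs))
-- ===== Notes on version B (the rewrite author's own statement) =====
-- stated objective: alternative
-- what changed: Replaced A's single left-to-right loop that appends symbols while maintaining three running counters by a divide-and-conquer recursion: the pair range is split in half, leaves classify one pair, and (string, idents, gaps, mismatches) tuples are merged bottom-up by concatenation/addition.
import Mathlib
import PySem

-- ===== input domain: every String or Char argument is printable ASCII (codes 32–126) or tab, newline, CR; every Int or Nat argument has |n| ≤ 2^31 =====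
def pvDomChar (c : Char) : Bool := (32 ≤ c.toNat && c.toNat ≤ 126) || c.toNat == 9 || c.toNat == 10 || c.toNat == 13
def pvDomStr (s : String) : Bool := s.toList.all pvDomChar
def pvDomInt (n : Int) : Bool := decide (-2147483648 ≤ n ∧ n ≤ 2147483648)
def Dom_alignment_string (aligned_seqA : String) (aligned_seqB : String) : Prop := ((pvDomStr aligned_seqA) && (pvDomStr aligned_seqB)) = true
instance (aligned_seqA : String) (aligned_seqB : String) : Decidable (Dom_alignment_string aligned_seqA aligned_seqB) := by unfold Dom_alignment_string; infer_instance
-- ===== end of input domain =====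

-- B replaces A's fused left-to-right build-and-count loop by a divide-and-conquer
-- recursion merging (string, counts) tuples; alternative decomposition, same result.

-- ===== PORT A =====
-- one iteration of A's loop: append the symbol and bump the matching counter
def pvStepA (st : List Char × Int × Int × Int) (p : Char × Char) : List Char × Int × Int × Int :=
  if p.1 = p.2 then (st.1 ++ ['|'], st.2.1 + 1, st.2.2.1, st.2.2.2)
  else if p.1 = '-' ∨ p.2 = '-' then (st.1 ++ [' '], st.2.1, st.2.2.1 + 1, st.2.2.2)
  else (st.1 ++ [':'], st.2.1, st.2.2.1, st.2.2.2 + 1)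

def alignment_string (aligned_seqA : String) (aligned_seqB : String) : String × Int × Int × Int :=
  let r := (aligned_seqA.toList.zip aligned_seqB.toList).foldl pvStepA ([], 0, 0, 0)
  (String.ofList r.1, r.2.1, r.2.2.1, r.2.2.2)

-- ===== PORT B =====
-- B's merge of two (symbols, idents, gaps, mismatches) tuples
def pvMerge (r1 r2 : List Char × Int × Int × Int) : List Char × Int × Int × Int :=
  (r1.1 ++ r2.1, r1.2.1 + r2.2.1, r1.2.2.1 + r2.2.2.1, r1.2.2.2 + r2.2.2.2)

-- B's solve(lo, hi): divide-and-conquer over the index range into `pairs`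
def pvSolve (pairs : List (Char × Char)) (lo hi : Nat) : List Char × Int × Int × Int :=
  if _h0 : hi ≤ lo then ([], 0, 0, 0)
  else if _h1 : hi - lo = 1 then
    match pairs[lo]? with
    | none => ([], 0, 0, 0)      -- unreachable when hi ≤ pairs.length
    | some (x, y) =>
      if x = y then (['|'], 1, 0, 0)
      else if x = '-' ∨ y = '-' then ([' '], 0, 1, 0)
      else ([':'], 0, 0, 1)
  else
    let mid := (lo + hi) / 2
    pvMerge (pvSolve pairs lo mid) (pvSolve pairs mid hi)
  termination_by hi - lo
  decreasing_by all_goals omega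

def alignment_string_alt (aligned_seqA : String) (aligned_seqB : String) : String × Int × Int × Int :=
  let pairs := aligned_seqA.toList.zip aligned_seqB.toList
  let r := pvSolve pairs 0 pairs.length
  (String.ofList r.1, r.2.1, r.2.2.1, r.2.2.2)

-- ===== PRECONDITION & SPEC =====
def Spec_alignment_string (aligned_seqA : String) (aligned_seqB : String) (out : String × Int × Int × Int) : Prop := out = alignment_string_alt aligned_seqA aligned_seqB
instance (aligned_seqA : String) (aligned_seqB : String) (out : String × Int × Int × Int) : Decidable (Spec_alignment_string aligned_seqA aligned_seqB out) := by unfold Spec_alignment_string; infer_instance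

-- ===== CLAIM (what is proved, stated in full; the proofs are below) =====
def Claim_equal_alignment_string : Prop := ∀ (aligned_seqA : String) (aligned_seqB : String), Dom_alignment_string aligned_seqA aligned_seqB → Spec_alignment_string aligned_seqA aligned_seqB (alignment_string aligned_seqA aligned_seqB)

-- ===== LEMMAS AND PROOFS =====
-- the symbol one base pair classifies to (used only to state the common closed form)
def pvSym (p : Char × Char) : Char :=
  if p.1 = p.2 then '|' else if p.1 = '-' ∨ p.2 = '-' then ' ' else ':'

-- loop invariant: A's fold appends the mapped symbols and adds the three tallies
lemma pvLoopA_eq (l : List (Char × Char)) (acc : List Char) (i g m : Int) :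
    l.foldl pvStepA (acc, i, g, m)
      = (acc ++ l.map pvSym,
         i + ((l.map pvSym).count '|' : Int),
         g + ((l.map pvSym).count ' ' : Int),
         m + ((l.map pvSym).count ':' : Int)) := by
  induction l generalizing acc i g m with
  | nil => simp
  | cons p t ih =>
    simp only [List.foldl_cons, List.map_cons, pvStepA, pvSym]
    split_ifs <;> simp [ih] <;> ring

-- B's divide-and-conquer computes the same closed form on the segment [lo, hi)
lemma pvSolve_eq_aux (n : Nat) : ∀ (pairs : List (Char × Char)) (lo hi : Nat),
    hi - lo ≤ n → hi ≤ pairs.length →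
    pvSolve pairs lo hi
      = (((pairs.drop lo).take (hi - lo)).map pvSym,
         ((((pairs.drop lo).take (hi - lo)).map pvSym).count '|' : Int),
         ((((pairs.drop lo).take (hi - lo)).map pvSym).count ' ' : Int),
         ((((pairs.drop lo).take (hi - lo)).map pvSym).count ':' : Int)) := by
  induction n with
  | zero =>
    intro pairs lo hi hle hhi
    have h0 : hi ≤ lo := by omega
    unfold pvSolve
    rw [dif_pos h0]
    have : hi - lo = 0 := by omega
    simp [this]
  | succ n ih =>
    intro pairs lo hi hle hhi
    unfold pvSolve
    split_ifs with h0 h1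
    · have : hi - lo = 0 := by omega
      simp [this]
    · have hlt : lo < pairs.length := by omega
      have hget : pairs[lo]? = some pairs[lo] := List.getElem?_eq_getElem hlt
      have hseg : (pairs.drop lo).take (hi - lo) = [pairs[lo]] := by
        rw [h1, List.drop_eq_getElem_cons hlt, List.take_succ_cons, List.take_zero]
      rw [hget, hseg]
      rcases hp : pairs[lo] with ⟨x, y⟩
      dsimp only
      split_ifs <;> simp_all [pvSym, List.count]
    · change pvMerge (pvSolve pairs lo ((lo + hi) / 2)) (pvSolve pairs ((lo + hi) / 2) hi) = _
      rw [ih pairs lo ((lo + hi) / 2) (by omega) (by omega),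
          ih pairs ((lo + hi) / 2) hi (by omega) hhi]
      unfold pvMerge
      have hsplit : (pairs.drop lo).take (hi - lo)
          = (pairs.drop lo).take ((lo + hi) / 2 - lo)
            ++ (pairs.drop ((lo + hi) / 2)).take (hi - (lo + hi) / 2) := by
        have h : hi - lo = ((lo + hi) / 2 - lo) + (hi - (lo + hi) / 2) := by omega
        have h2 : lo + ((lo + hi) / 2 - lo) = (lo + hi) / 2 := by omega
        rw [h, List.take_add, List.drop_drop, h2]
      simp [hsplit, List.count_append]

-- on the full range, B's recursion yields the whole symbol list and its tallies
lemma pvSolve_all (l : List (Char × Char)) :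
    pvSolve l 0 l.length
      = (l.map pvSym, ((l.map pvSym).count '|' : Int),
         ((l.map pvSym).count ' ' : Int), ((l.map pvSym).count ':' : Int)) := by
  rw [pvSolve_eq_aux l.length l 0 l.length (by omega) le_rfl]
  simp

theorem alignment_string_spec : Claim_equal_alignment_string := by
  intro a b _
  unfold Spec_alignment_string alignment_string alignment_string_alt
  have h := pvSolve_all (a.toList.zip b.toList)
  have hlen : (a.toList.zip b.toList).length = min a.length b.length := by simp
  rw [hlen] at h
  simp [pvLoopA_eq, h]
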